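-- pv_equiv track=rewrite | github.com/Carson7822/Python-Fundamentals-CSE174 | Lectures,Tests,Etc/problem_solving.py | haveThree
-- ===== SOURCE A (Python) =====
-- def haveThree(numbers : list) -> list:
--     count3 = 0
--
--     for i in range(len(numbers)):
--         if numbers[i] == 3:
--             count3 += 1
--             if (i > 0 and numbers[i - 1] == 3):
--                 return False
--     if count3 == 3:
--         return True
--     else:
--         return False
-- ===== SOURCE B (Python) =====
-- def haveThree(numbers: list) -> bool:
--     return numbers.count(3) == 3 and all(
--         not (a == 3 and b == 3) for a, b in zip(numbers, numbers[1:])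
--     )
-- ===== Notes on version B (the rewrite author's own statement) =====
-- stated objective: simpler
-- what changed: Replaces the fused index loop with manual counter and early return by two independent passes: a count(3) == 3 check and an adjacency check over zipped consecutive pairs, combined with 'and'.
import Mathlib
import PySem

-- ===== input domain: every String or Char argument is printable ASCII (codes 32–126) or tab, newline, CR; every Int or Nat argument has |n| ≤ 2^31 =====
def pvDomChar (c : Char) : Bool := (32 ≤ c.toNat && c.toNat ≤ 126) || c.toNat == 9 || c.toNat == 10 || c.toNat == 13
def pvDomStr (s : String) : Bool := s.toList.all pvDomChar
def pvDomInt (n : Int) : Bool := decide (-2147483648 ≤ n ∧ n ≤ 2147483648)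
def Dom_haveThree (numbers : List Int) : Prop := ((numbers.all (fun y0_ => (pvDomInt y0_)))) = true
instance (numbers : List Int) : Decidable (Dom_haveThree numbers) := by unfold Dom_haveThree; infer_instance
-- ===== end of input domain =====

-- B rewrites A's fused early-returning index loop as two independent passes
-- (a count-of-3s check and an adjacent-pair check) combined with `and`.

-- ===== PORT A =====
-- literal transliteration of A's `for i in range(len(numbers))` loop with its
-- running counter and early `return False`
def haveThreeGo (numbers : List Int) (i : Nat) (count3 : Int) : Bool :=
  if _h : i < numbers.length then
    if numbers.getD i 0 = 3 then
      if i > 0 ∧ numbers.getD (i - 1) 0 = 3 then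
        false
      else
        haveThreeGo numbers (i + 1) (count3 + 1)
    else
      haveThreeGo numbers (i + 1) count3
  else
    decide (count3 = 3)
termination_by numbers.length - i

def haveThree (numbers : List Int) : Bool :=
  haveThreeGo numbers 0 0

-- ===== PORT B =====
def haveThree_alt (numbers : List Int) : Bool :=
  (numbers.count 3 == 3) &&
    ((numbers.zip numbers.tail).all (fun p => !(p.1 == 3 && p.2 == 3)))

-- ===== PRECONDITION & SPEC =====
def Spec_haveThree (numbers : List Int) (out : Bool) : Prop := out = haveThree_alt numbers
instance (numbers : List Int) (out : Bool) : Decidable (Spec_haveThree numbers out) := by unfold Spec_haveThree; infer_instance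

-- ===== CLAIM (what is proved, stated in full; the proofs are below) =====
def Claim_equal_haveThree : Prop := ∀ (numbers : List Int), Dom_haveThree numbers → Spec_haveThree numbers (haveThree numbers)

-- ===== LEMMAS AND PROOFS =====

-- the adjacency pass of B, as a predicate on a list suffix
def pairsOK (l : List Int) : Bool :=
  (l.zip l.tail).all (fun p => !(p.1 == 3 && p.2 == 3))

theorem pairsOK_cons_cons (x y : Int) (l : List Int) :
    pairsOK (x :: y :: l) = (!(x == 3 && y == 3) && pairsOK (y :: l)) := by
  simp [pairsOK]

theorem pairsOK_short (l : List Int) (h : l.length ≤ 1) : pairsOK l = true := by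
  match l, h with
  | [], _ => rfl
  | [x], _ => rfl

theorem drop_cons_getElem (numbers : List Int) (i : Nat) (h : i < numbers.length) :
    numbers.drop i = numbers[i] :: numbers.drop (i + 1) := by
  exact List.drop_eq_getElem_cons h

-- loop invariant for A's index loop: from index i with running count c, the loop
-- returns (c + #3s in the rest = 3) AND no adjacent 3-pair from index max(i-1,0) on
theorem haveThreeGo_eq (numbers : List Int) (i : Nat) (c : Int) :
    haveThreeGo numbers i c =
      (decide (c + ((numbers.drop i).count 3 : Int) = 3) && pairsOK (numbers.drop (i - 1))) := by
  by_cases h : i < numbers.length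
  · have hdrop := drop_cons_getElem numbers i h
    by_cases h3 : numbers[i] = 3
    · by_cases hadj : i > 0 ∧ numbers.getD (i - 1) 0 = 3
      · -- early return False; the pair (i-1, i) refutes pairsOK
        obtain ⟨hi, hprev⟩ := hadj
        have hi1 : i - 1 < numbers.length := by omega
        have hprev' : numbers[i - 1] = 3 := by
          have := List.getD_eq_getElem numbers 0 hi1
          omega
        have hdrop1 : numbers.drop (i - 1) = numbers[i - 1] :: numbers[i] :: numbers.drop (i + 1) := by
          have e1 := drop_cons_getElem numbers (i - 1) hi1
          have e2 : i - 1 + 1 = i := by omega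
          rw [e1, e2, hdrop]
        rw [haveThreeGo, dif_pos h, List.getD_eq_getElem numbers 0 h, if_pos h3,
          if_pos (And.intro hi hprev), hdrop1, pairsOK_cons_cons]
        simp [hprev', h3]
      · rw [haveThreeGo]
        simp only [h, dif_pos, List.getD_eq_getElem numbers 0 h, h3, hadj, if_neg,
          not_false_eq_true]
        rw [haveThreeGo_eq numbers (i + 1) (c + 1)]
        have hcount : ((numbers.drop i).count 3 : Int) = ((numbers.drop (i + 1)).count 3 : Int) + 1 := by
          rw [hdrop, List.count_cons]
          simp [h3]
        have hpairs : pairsOK (numbers.drop (i - 1)) = pairsOK (numbers.drop i) := by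
          rcases Nat.eq_zero_or_pos i with hz | hp
          · simp [hz]
          · have hi1 : i - 1 < numbers.length := by omega
            have hprev' : numbers[i - 1] ≠ 3 := by
              intro hc
              apply hadj
              refine ⟨hp, ?_⟩
              rw [List.getD_eq_getElem numbers 0 hi1, hc]
            have e2 : i - 1 + 1 = i := by omega
            have hdrop1 : numbers.drop (i - 1) = numbers[i - 1] :: numbers[i] :: numbers.drop (i + 1) := by
              have e1 := drop_cons_getElem numbers (i - 1) hi1
              rw [e1, e2, hdrop]
            rw [hdrop1, hdrop, pairsOK_cons_cons]
            simp [hprev']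
        have e3 : i + 1 - 1 = i := by omega
        rw [e3, hcount, hpairs]
        have : (c + 1 + ((numbers.drop (i + 1)).count 3 : Int) = 3) ↔
            (c + (((numbers.drop (i + 1)).count 3 : Int) + 1) = 3) := by omega
        simp [this]
    · rw [haveThreeGo]
      simp only [h, dif_pos, List.getD_eq_getElem numbers 0 h, h3, if_neg, not_false_eq_true]
      rw [haveThreeGo_eq numbers (i + 1) c]
      have hcount : ((numbers.drop i).count 3 : Int) = ((numbers.drop (i + 1)).count 3 : Int) := by
        rw [hdrop, List.count_cons]
        simp [h3]
      have hpairs : pairsOK (numbers.drop (i - 1)) = pairsOK (numbers.drop i) := by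
        rcases Nat.eq_zero_or_pos i with hz | hp
        · simp [hz]
        · have hi1 : i - 1 < numbers.length := by omega
          have e2 : i - 1 + 1 = i := by omega
          have hdrop1 : numbers.drop (i - 1) = numbers[i - 1] :: numbers[i] :: numbers.drop (i + 1) := by
            have e1 := drop_cons_getElem numbers (i - 1) hi1
            rw [e1, e2, hdrop]
          rw [hdrop1, hdrop, pairsOK_cons_cons]
          simp [h3]
      have e3 : i + 1 - 1 = i := by omega
      rw [e3, hcount, hpairs]
  · rw [haveThreeGo]
    have hlen : numbers.length ≤ i := by omega
    have hdrop : numbers.drop i = [] := List.drop_eq_nil_of_le hlen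
    have hshort : (numbers.drop (i - 1)).length ≤ 1 := by
      rw [List.length_drop]
      omega
    simp [h, hdrop, pairsOK_short _ hshort]
termination_by numbers.length - i

-- ===== VERDICT (by name: the statement is the Claim_ definition above) =====
theorem haveThree_spec : Claim_equal_haveThree := by
  intro numbers _
  unfold Spec_haveThree haveThree haveThree_alt
  rw [haveThreeGo_eq numbers 0 0]
  simp only [Nat.zero_sub, List.drop_zero, pairsOK]
  simp only [Int.zero_add]
  by_cases hc : List.count 3 numbers = 3
  · simp [hc]
  · have h1 : ((List.count 3 numbers : Int)) ≠ 3 := by exact_mod_cast hc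
    simp [h1, hc]
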